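-- pv_equiv track=rewrite | github.com/TeleRehaBDSS/TeleRehaB_Home_System | clinic_main.py | reorder_exercises2
-- ===== SOURCE A (Python) =====
-- def reorder_exercises2(session):
--     group_definitions = {
--         "Stretching": [11, 12, 13],
--         "Sitting Exercises": [1, 2, 3, 14, 15, 16, 17, 18],
--         "Standing Exercises": [4, 5, 6, 7,  19, 20, 21, 43],
--         "Walking Exercises": [8, 9, 10, 22],
--         "Optokinetic Exercises": [24, 25, 26, 27],
--         "Exergames": [28, 29, 30, 31, 32, 33, 34, 35, 36],
--         "Cognitive Games": [37, 38, 39, 40, 41, 42]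
--     }
--
--     # Initialize ordered buckets
--     grouped = {
--         "Stretching": [],
--         "Sitting Exercises": [],
--         "Standing Exercises": [],
--         "Walking Exercises": [],
--         "Optokinetic Exercises": [],
--         "Exergames": [],
--         "Cognitive Games": [],
--     }
--
--     # Track assigned IDs to avoid duplicates
--     assigned_ids = set()
--
--     # Process each exercise in input order
--     for ex in session:
--         eid = ex["exerciseId"]
--         for group_name, id_list in group_definitions.items():
--             if eid in id_list and eid not in assigned_ids:
--                 grouped[group_name].append(ex)
--                 assigned_ids.add(eid)
--                 break
--
--     # Return in desired group order
--     ordered_session = []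
--     for group_name in grouped:
--         ordered_session.extend(grouped[group_name])
--     return ordered_session
-- ===== SOURCE B (Python) =====
-- def reorder_exercises2(session):
--     group_definitions = {
--         "Stretching": [11, 12, 13],
--         "Sitting Exercises": [1, 2, 3, 14, 15, 16, 17, 18],
--         "Standing Exercises": [4, 5, 6, 7,  19, 20, 21, 43],
--         "Walking Exercises": [8, 9, 10, 22],
--         "Optokinetic Exercises": [24, 25, 26, 27],
--         "Exergames": [28, 29, 30, 31, 32, 33, 34, 35, 36],
--         "Cognitive Games": [37, 38, 39, 40, 41, 42]
--     }
--     # rank: exercise id -> position of its group in the fixed group order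
--     rank = {}
--     for i, ids in enumerate(group_definitions.values()):
--         for eid in ids:
--             rank[eid] = i
--     kept = []
--     seen = set()
--     for ex in session:
--         eid = ex["exerciseId"]
--         if eid in rank and eid not in seen:
--             kept.append(ex)
--             seen.add(eid)
--     # stable sort keeps input order within each group
--     return sorted(kept, key=lambda ex: rank[ex["exerciseId"]])
-- ===== Notes on version B (the rewrite author's own statement) =====
-- stated objective: alternative
-- what changed: Replaced A's seven ordered buckets filled via an inner scan over the group table and then concatenated, by a flattened id->group-rank dictionary, one filtering/deduplicating pass, and a stable sort keyed by group rank.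
import Mathlib
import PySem

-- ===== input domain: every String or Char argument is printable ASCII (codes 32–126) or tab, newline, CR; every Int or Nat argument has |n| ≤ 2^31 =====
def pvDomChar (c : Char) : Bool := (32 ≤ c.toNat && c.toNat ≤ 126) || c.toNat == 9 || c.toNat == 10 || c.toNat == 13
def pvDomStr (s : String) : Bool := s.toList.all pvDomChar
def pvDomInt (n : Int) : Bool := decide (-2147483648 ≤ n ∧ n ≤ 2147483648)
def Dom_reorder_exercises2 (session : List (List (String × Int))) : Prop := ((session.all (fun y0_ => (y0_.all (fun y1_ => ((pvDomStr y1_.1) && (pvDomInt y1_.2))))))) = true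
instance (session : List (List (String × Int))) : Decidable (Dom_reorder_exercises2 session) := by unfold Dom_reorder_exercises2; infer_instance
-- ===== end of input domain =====

-- B replaces A's ordered buckets + concatenation by a flattened id→group-rank dict, one
-- filtering/deduplicating pass and a stable sort keyed by group rank (alternative, same result).

-- the literal group table both Pythons write out (shared constant, not algorithm)
def pvGroupDefs : List (String × List Int) :=
  [("Stretching", [11, 12, 13]),
   ("Sitting Exercises", [1, 2, 3, 14, 15, 16, 17, 18]),
   ("Standing Exercises", [4, 5, 6, 7, 19, 20, 21, 43]),
   ("Walking Exercises", [8, 9, 10, 22]),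
   ("Optokinetic Exercises", [24, 25, 26, 27]),
   ("Exergames", [28, 29, 30, 31, 32, 33, 34, 35, 36]),
   ("Cognitive Games", [37, 38, 39, 40, 41, 42])]

-- ex["exerciseId"]; the .getD 0 default is unreachable under Pre_ (KeyError excluded there)
def pvLookup (ex : List (String × Int)) : Int :=
  ((PySem.Dict.mk ex).get? "exerciseId").getD 0

-- ===== PORT A =====

def pvGrouped0 : PySem.Dict String (List (List (String × Int))) :=
  PySem.Dict.mk
    [("Stretching", []), ("Sitting Exercises", []), ("Standing Exercises", []),
     ("Walking Exercises", []), ("Optokinetic Exercises", []), ("Exergames", []),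
     ("Cognitive Games", [])]

-- the inner 'for group_name, id_list in group_definitions.items(): … break' loop
def pvAssignLoop (eid : Int) (ex : List (String × Int)) :
    List (String × List Int) →
    PySem.Dict String (List (List (String × Int))) × PySem.Set Int →
    PySem.Dict String (List (List (String × Int))) × PySem.Set Int
  | [], st => st
  | (name, ids) :: rest, (grouped, assigned) =>
    if eid ∈ ids ∧ eid ∉ assigned then
      (grouped.modify name [] (· ++ [ex]), PySem.Set.add assigned eid)
    else pvAssignLoop eid ex rest (grouped, assigned)

def reorder_exercises2 (session : List (List (String × Int))) : List (List (String × Int)) :=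
  let groupDefinitions := PySem.Dict.mk pvGroupDefs
  let st := session.foldl
    (fun st ex => pvAssignLoop (pvLookup ex) ex groupDefinitions.items st)
    (pvGrouped0, PySem.Set.empty)
  st.1.keys.foldl (fun acc name => acc ++ st.1.getD name []) []

-- ===== PORT B =====

-- rank = {} ; for i, ids in enumerate(group_definitions.values()): for eid in ids: rank[eid] = i
def pvRank : PySem.Dict Int Int :=
  (PySem.List.enumerate (PySem.Dict.mk pvGroupDefs).values).foldl
    (fun r p => p.2.foldl (fun r eid => r.insert eid p.1) r) PySem.Dict.empty

def reorder_exercises2_alt (session : List (List (String × Int))) : List (List (String × Int)) :=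
  let ks := session.foldl
    (fun ks ex =>
      let eid := pvLookup ex
      if pvRank.contains eid ∧ eid ∉ ks.2 then (ks.1 ++ [ex], PySem.Set.add ks.2 eid) else ks)
    ([], PySem.Set.empty)
  -- rank[ex["exerciseId"]]; the .getD 0 default is unreachable: every kept id is a rank key
  PySem.List.sorted ks.1 (fun ex => pvRank.getD (pvLookup ex) 0)

-- ===== PRECONDITION & SPEC =====
-- Pre_ excludes exactly the sessions containing an exercise dict without the key
-- "exerciseId", on which the Python A (and B) raises KeyError.
def Pre_reorder_exercises2 (session : List (List (String × Int))) : Prop :=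
  ∀ ex ∈ session, "exerciseId" ∈ ex.map Prod.fst
instance (session : List (List (String × Int))) : Decidable (Pre_reorder_exercises2 session) := by
  unfold Pre_reorder_exercises2; infer_instance

def pvWitness_reorder_exercises2 : (List (List (String × Int))) :=
  [[("exerciseId", 11)], [("exerciseId", 5), ("reps", 3)]]

def Spec_reorder_exercises2 (session : List (List (String × Int))) (out : List (List (String × Int))) : Prop := out = reorder_exercises2_alt session
instance (session : List (List (String × Int))) (out : List (List (String × Int))) : Decidable (Spec_reorder_exercises2 session out) := by unfold Spec_reorder_exercises2; infer_instance

-- ===== CLAIM (what is proved, stated in full; the proofs are below) =====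
def Claim_equal_reorder_exercises2 : Prop := ∀ (session : List (List (String × Int))), Dom_reorder_exercises2 session → Pre_reorder_exercises2 session → Spec_reorder_exercises2 session (reorder_exercises2 session)

-- ===== LEMMAS AND PROOFS =====

-- the group names, in order
def pvNames : List String :=
  ["Stretching", "Sitting Exercises", "Standing Exercises", "Walking Exercises",
   "Optokinetic Exercises", "Exergames", "Cognitive Games"]

-- all grouped ids, in table order
def pvAllIds : List Int :=
  [11, 12, 13, 1, 2, 3, 14, 15, 16, 17, 18, 4, 5, 6, 7, 19, 20, 21, 43, 8, 9, 10, 22,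
   24, 25, 26, 27, 28, 29, 30, 31, 32, 33, 34, 35, 36, 37, 38, 39, 40, 41, 42]

-- first group (index, name) whose id list contains eid
def gfindAux : List (String × List Int) → Int → Int → Option (Int × String)
  | [], _, _ => none
  | (name, ids) :: rest, i, eid => if eid ∈ ids then some (i, name) else gfindAux rest (i + 1) eid

def keyIdx (ex : List (String × Int)) : Option Int :=
  (gfindAux pvGroupDefs 0 (pvLookup ex)).map (·.1)

def pvKey (ex : List (String × Int)) : Int := (keyIdx ex).getD 0

-- the exercises both programs keep (first occurrence of each grouped id), in input order
def keptAux (seen : PySem.Set Int) : List (List (String × Int)) → List (List (String × Int))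
  | [] => []
  | ex :: rest =>
    if (gfindAux pvGroupDefs 0 (pvLookup ex)).isSome ∧ pvLookup ex ∉ seen then
      ex :: keptAux (PySem.Set.add seen (pvLookup ex)) rest
    else keptAux seen rest

-- concatenation of the key-class blocks lo, lo+1, …, lo+n-1
def pvBlocks {α : Type} (k : α → Int) (xs : List α) : Nat → Int → List α
  | 0, _ => []
  | n + 1, lo => xs.filter (fun x => k x == lo) ++ pvBlocks k xs n (lo + 1)

def pvStep (st : PySem.Dict String (List (List (String × Int))) × PySem.Set Int)
    (ex : List (String × Int)) :
    PySem.Dict String (List (List (String × Int))) × PySem.Set Int :=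
  pvAssignLoop (pvLookup ex) ex pvGroupDefs st

lemma pvBlocks_nil {α : Type} (k : α → Int) (n : Nat) :
    ∀ lo, pvBlocks k ([] : List α) n lo = [] := by
  induction n with
  | zero => intro lo; rfl
  | succ n ih => intro lo; simp [pvBlocks, ih]

lemma mem_pvBlocks {α : Type} (k : α → Int) (xs : List α) (n : Nat) :
    ∀ lo y, y ∈ pvBlocks k xs n lo → y ∈ xs ∧ lo ≤ k y ∧ k y < lo + n := by
  induction n with
  | zero => intro lo y h; simp [pvBlocks] at h
  | succ n ih =>
    intro lo y h
    simp only [pvBlocks, List.mem_append] at h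
    rcases h with h | h
    · have h1 := List.of_mem_filter h
      have h2 : k y = lo := by simpa using h1
      refine ⟨List.mem_of_mem_filter h, by omega, by push_cast; omega⟩
    · obtain ⟨h1, h2, h3⟩ := ih (lo + 1) y h
      refine ⟨h1, by omega, by push_cast at h3 ⊢; omega⟩

lemma pvBlocks_append_lt {α : Type} (k : α → Int) (x : α) (ys : List α) (n : Nat) :
    ∀ lo, k x < lo → pvBlocks k (ys ++ [x]) n lo = pvBlocks k ys n lo := by
  induction n with
  | zero => intro lo _; rfl
  | succ n ih =>
    intro lo h
    have hx : (k x == lo) = false := by simp; omega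
    simp only [pvBlocks, List.filter_append, List.filter_cons, hx, List.filter_nil]
    rw [ih (lo + 1) (by omega)]
    simp

lemma insertBy_append_not {α : Type} (b : α → α → Bool) (x : α) (l r : List α)
    (h : ∀ y ∈ l, b x y = false) :
    PySem.List.insertBy b x (l ++ r) = l ++ PySem.List.insertBy b x r := by
  induction l with
  | nil => rfl
  | cons a l ih =>
    simp only [List.cons_append, PySem.List.insertBy, h a (by simp)]
    simp [ih (fun y hy => h y (by simp [hy]))]

lemma insertBy_all_before {α : Type} (b : α → α → Bool) (x : α) (r : List α)
    (h : ∀ y ∈ r, b x y = true) :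
    PySem.List.insertBy b x r = x :: r := by
  cases r with
  | nil => rfl
  | cons a t => simp [PySem.List.insertBy, h a (by simp)]

lemma insertBy_pvBlocks {α : Type} (k : α → Int) (x : α) (ys : List α) :
    ∀ (n : Nat) (lo : Int), lo ≤ k x → k x < lo + n →
    PySem.List.insertBy (fun a b => decide (k a < k b)) x (pvBlocks k ys n lo) =
      pvBlocks k (ys ++ [x]) n lo := by
  intro n
  induction n with
  | zero => intro lo h1 h2; exfalso; push_cast at h2; omega
  | succ n ih =>
    intro lo h1 h2
    by_cases hx : k x = lo
    · simp only [pvBlocks]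
      rw [insertBy_append_not _ _ _ _
        (by intro y hy; have := List.of_mem_filter hy; simp at this ⊢; omega)]
      rw [insertBy_all_before _ _ _
        (by intro y hy; have := (mem_pvBlocks k ys n (lo + 1) y hy).2.1; simp; omega)]
      rw [pvBlocks_append_lt k x ys n (lo + 1) (by omega)]
      have hxt : (k x == lo) = true := by simp [hx]
      simp [List.filter_append, hxt]
    · have hlt : lo < k x := by omega
      simp only [pvBlocks]
      rw [insertBy_append_not _ _ _ _
        (by intro y hy; have := List.of_mem_filter hy; simp at this ⊢; omega)]
      have hxf : (k x == lo) = false := by simp; omega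
      rw [ih (lo + 1) (by omega) (by push_cast at h2 ⊢; omega)]
      simp [List.filter_append, hxf]

lemma sorted_eq_pvBlocks {α : Type} (k : α → Int) (n : Nat) (xs : List α)
    (h : ∀ y ∈ xs, 0 ≤ k y ∧ k y < n) :
    PySem.List.sorted xs k = pvBlocks k xs n 0 := by
  induction xs using List.reverseRecOn with
  | nil => rw [PySem.List.sorted_eq_foldl_insertBy, pvBlocks_nil]; rfl
  | append_singleton ys x ih =>
    rw [PySem.List.sorted_eq_foldl_insertBy, List.foldl_append]
    simp only [List.foldl_cons, List.foldl_nil]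
    rw [← PySem.List.sorted_eq_foldl_insertBy]
    rw [ih (fun y hy => h y (by simp [hy]))]
    exact insertBy_pvBlocks k x ys n 0 (h x (by simp)).1 (by simpa using (h x (by simp)).2)

lemma gfindAux_none (eid : Int) (gdefs : List (String × List Int))
    (h : ∀ g ∈ gdefs, eid ∉ g.2) : ∀ i0, gfindAux gdefs i0 eid = none := by
  induction gdefs with
  | nil => intro _; rfl
  | cons g rest ih =>
    intro i0
    obtain ⟨name, ids⟩ := g
    rw [gfindAux, if_neg (h (name, ids) (by simp))]
    exact ih (fun g hg => h g (by simp [hg])) _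

lemma gfindAux_some (eid : Int) : ∀ (gdefs : List (String × List Int)) (i0 j : Int) (name : String),
    gfindAux gdefs i0 eid = some (j, name) →
    ∃ d : Nat, j = i0 + d ∧ (gdefs.map Prod.fst)[d]? = some name := by
  intro gdefs
  induction gdefs with
  | nil => intro i0 j name h; simp [gfindAux] at h
  | cons g rest ih =>
    intro i0 j name h
    obtain ⟨gn, ids⟩ := g
    rw [gfindAux] at h
    split_ifs at h with hc
    · refine ⟨0, ?_, ?_⟩ <;> simp_all
    · obtain ⟨d, hd1, hd2⟩ := ih (i0 + 1) j name h
      exact ⟨d + 1, by omega, by simpa using hd2⟩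

set_option maxRecDepth 16384 in
lemma rank_get (eid : Int) : pvRank.get? eid = (gfindAux pvGroupDefs 0 eid).map (·.1) := by
  by_cases h : eid ∈ pvAllIds
  · simp only [pvAllIds, List.mem_cons, List.not_mem_nil, or_false] at h
    rcases h with h | h | h | h | h | h | h | h | h | h | h | h | h | h | h | h | h | h | h | h |
      h | h | h | h | h | h | h | h | h | h | h | h | h | h | h | h | h | h | h | h | h | h <;>
      subst h <;> decide
  · have hk : pvRank.keys = pvAllIds := by decide
    have h1 : pvRank.get? eid = none := by
      rw [PySem.Dict.get?_eq_none_iff_not_mem_keys, hk]; exact h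
    rw [h1, gfindAux_none eid pvGroupDefs ?_ 0]
    · rfl
    · intro g hg hmem
      apply h
      fin_cases hg <;> simp_all [pvAllIds]

lemma rank_contains (eid : Int) :
    pvRank.contains eid = (gfindAux pvGroupDefs 0 eid).isSome := by
  rw [PySem.Dict.contains_eq_isSome_get?, rank_get, Option.isSome_map]

lemma assignLoop_mem (eid : Int) (ex : List (String × Int)) :
    ∀ (gdefs : List (String × List Int)) grouped (assigned : PySem.Set Int), eid ∈ assigned →
    pvAssignLoop eid ex gdefs (grouped, assigned) = (grouped, assigned) := by
  intro gdefs
  induction gdefs with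
  | nil => intro grouped assigned _; rfl
  | cons g rest ih =>
    intro grouped assigned h
    obtain ⟨name, ids⟩ := g
    rw [pvAssignLoop, if_neg (by tauto)]
    exact ih grouped assigned h

lemma assignLoop_not_mem (eid : Int) (ex : List (String × Int)) :
    ∀ (gdefs : List (String × List Int)) (i0 : Int) grouped (assigned : PySem.Set Int),
    eid ∉ assigned →
    pvAssignLoop eid ex gdefs (grouped, assigned) =
      (match gfindAux gdefs i0 eid with
       | none => (grouped, assigned)
       | some (_, name) => (grouped.modify name [] (· ++ [ex]), PySem.Set.add assigned eid)) := by
  intro gdefs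
  induction gdefs with
  | nil => intros; rfl
  | cons g rest ih =>
    intro i0 grouped assigned h
    obtain ⟨name, ids⟩ := g
    rw [pvAssignLoop, gfindAux]
    by_cases hc : eid ∈ ids
    · rw [if_pos ⟨hc, h⟩, if_pos hc]
    · rw [if_neg (by tauto), if_neg hc]
      exact ih (i0 + 1) grouped assigned h

lemma pvNames_eq_map : pvGroupDefs.map Prod.fst = pvNames := by decide

lemma name_of_gfind (eid j : Int) (name : String)
    (hf : gfindAux pvGroupDefs 0 eid = some (j, name)) :
    ∃ d : Nat, j = (d : Int) ∧ d < 7 ∧ name = pvNames.getD d "" := by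
  obtain ⟨d, hd1, hd2⟩ := gfindAux_some eid pvGroupDefs 0 j name hf
  rw [pvNames_eq_map] at hd2
  have hd7 : d < 7 := by
    have := List.getElem?_eq_some_iff.mp hd2
    simpa [pvNames] using this.1
  refine ⟨d, by omega, hd7, ?_⟩
  simp only [List.getD]
  rw [hd2]
  rfl

lemma pvNames_getD_mem (d : Nat) (hd : d < 7) : pvNames.getD d "" ∈ pvNames := by
  interval_cases d <;> simp [pvNames]

lemma step_keys (ex : List (String × Int))
    (st : PySem.Dict String (List (List (String × Int))) × PySem.Set Int)
    (h : st.1.keys = pvNames) : (pvStep st ex).1.keys = pvNames := by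
  obtain ⟨grouped, assigned⟩ := st
  by_cases hm : pvLookup ex ∈ assigned
  · rw [pvStep, assignLoop_mem _ _ _ _ _ hm]; exact h
  · rw [pvStep, assignLoop_not_mem _ _ _ 0 _ _ hm]
    rcases hf : gfindAux pvGroupDefs 0 (pvLookup ex) with _ | ⟨j, name⟩
    · exact h
    · obtain ⟨d, _, hd7, hnm⟩ := name_of_gfind _ _ _ hf
      have hmem : name ∈ pvNames := hnm ▸ pvNames_getD_mem d hd7
      simp only []
      rw [PySem.Dict.keys_modify, PySem.Dict.keys_insert_of_contains]
      · exact h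
      · rw [PySem.Dict.contains_iff_mem_keys, h]; exact hmem

lemma fold_keys (session : List (List (String × Int))) :
    ∀ st, st.1.keys = pvNames → ((session.foldl pvStep st).1).keys = pvNames := by
  induction session with
  | nil => intro st h; exact h
  | cons ex rest ih => intro st h; exact ih _ (step_keys ex st h)

lemma pvNames_getD_inj (i j : Nat) (hi : i < 7) (hj : j < 7)
    (h : pvNames.getD i "" = pvNames.getD j "") : i = j := by
  interval_cases i <;> interval_cases j <;> simp_all [pvNames]

lemma fold_getD (session : List (List (String × Int))) :
    ∀ (grouped : PySem.Dict String (List (List (String × Int)))) (assigned : PySem.Set Int),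
    grouped.keys = pvNames → ∀ i : Nat, i < 7 →
    ((session.foldl pvStep (grouped, assigned)).1.getD (pvNames.getD i "") []) =
      grouped.getD (pvNames.getD i "") [] ++
        (keptAux assigned session).filter (fun ex => keyIdx ex == some (i : Int)) := by
  induction session with
  | nil => intro grouped assigned _ i _; simp [keptAux]
  | cons ex rest ih =>
    intro grouped assigned hk i hi
    rw [List.foldl_cons]
    by_cases hm : pvLookup ex ∈ assigned
    · have hstep : pvStep (grouped, assigned) ex = (grouped, assigned) := by
        rw [pvStep]; exact assignLoop_mem _ _ _ _ _ hm
      rw [hstep, ih grouped assigned hk i hi]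
      congr 1
      rw [keptAux, if_neg (by tauto)]
    · rcases hf : gfindAux pvGroupDefs 0 (pvLookup ex) with _ | ⟨j, name⟩
      · have hstep : pvStep (grouped, assigned) ex = (grouped, assigned) := by
          rw [pvStep, assignLoop_not_mem _ _ _ 0 _ _ hm, hf]
        rw [hstep, ih grouped assigned hk i hi]
        congr 1
        rw [keptAux, if_neg (by simp [hf])]
      · have hstep : pvStep (grouped, assigned) ex =
            (grouped.modify name [] (· ++ [ex]), PySem.Set.add assigned (pvLookup ex)) := by
          rw [pvStep, assignLoop_not_mem _ _ _ 0 _ _ hm, hf]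
        rw [hstep]
        obtain ⟨d, hd1, hd7, hname⟩ := name_of_gfind _ _ _ hf
        subst hname
        have hk' : (grouped.modify (pvNames.getD d "") [] (· ++ [ex])).keys = pvNames := by
          rw [PySem.Dict.keys_modify, PySem.Dict.keys_insert_of_contains]
          · exact hk
          · rw [PySem.Dict.contains_iff_mem_keys, hk]
            exact pvNames_getD_mem d hd7
        rw [ih _ _ hk' i hi]
        rw [keptAux, if_pos ⟨by simp [hf], hm⟩]
        have hkey : keyIdx ex = some j := by simp [keyIdx, hf]
        rw [List.filter_cons]
        by_cases hij : i = d
        · subst hij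
          rw [PySem.Dict.getD_modify, if_pos rfl]
          have hpass : (keyIdx ex == some (i : Int)) = true := by
            simp [hkey]; omega
          simp [hpass]
        · rw [PySem.Dict.getD_modify,
            if_neg (fun hEq => hij (pvNames_getD_inj i d hi hd7 hEq))]
          have hfail : (keyIdx ex == some (i : Int)) = false := by
            simp [hkey]; omega
          simp [hfail]

lemma bfold (session : List (List (String × Int))) :
    ∀ (acc : List (List (String × Int))) (seen : PySem.Set Int),
    (session.foldl
      (fun ks ex =>
        let eid := pvLookup ex
        if pvRank.contains eid ∧ eid ∉ ks.2 then (ks.1 ++ [ex], PySem.Set.add ks.2 eid) else ks)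
      (acc, seen)).1 = acc ++ keptAux seen session := by
  induction session with
  | nil => intro acc seen; simp [keptAux]
  | cons ex rest ih =>
    intro acc seen
    rw [List.foldl_cons]
    by_cases hc : (gfindAux pvGroupDefs 0 (pvLookup ex)).isSome ∧ pvLookup ex ∉ seen
    · rw [keptAux, if_pos hc]
      have hcond : (pvRank.contains (pvLookup ex) = true) ∧ pvLookup ex ∉ seen :=
        ⟨by rw [rank_contains]; exact hc.1, hc.2⟩
      simp only [if_pos hcond]
      rw [ih]; simp
    · rw [keptAux, if_neg hc]
      have hcond : ¬ ((pvRank.contains (pvLookup ex) = true) ∧ pvLookup ex ∉ seen) := by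
        rw [rank_contains]; exact hc
      simp only [if_neg hcond]
      exact ih acc seen

lemma keptAux_isSome : ∀ (session : List (List (String × Int))) (seen : PySem.Set Int)
    (ex : List (String × Int)), ex ∈ keptAux seen session →
    (gfindAux pvGroupDefs 0 (pvLookup ex)).isSome := by
  intro session
  induction session with
  | nil => intro seen ex h; simp [keptAux] at h
  | cons e rest ih =>
    intro seen ex h
    rw [keptAux] at h
    split_ifs at h with hcond
    · rcases List.mem_cons.mp h with h | h
      · subst h; exact hcond.1
      · exact ih _ ex h
    · exact ih _ ex h

lemma pvKey_bounds (session : List (List (String × Int))) (seen : PySem.Set Int)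
    (ex : List (String × Int)) (h : ex ∈ keptAux seen session) :
    0 ≤ pvKey ex ∧ pvKey ex < 7 := by
  have hs := keptAux_isSome session seen ex h
  rcases hf : gfindAux pvGroupDefs 0 (pvLookup ex) with _ | ⟨j, name⟩
  · rw [hf] at hs; simp at hs
  · obtain ⟨d, hd1, hd7, _⟩ := name_of_gfind _ _ _ hf
    have : pvKey ex = j := by simp [pvKey, keyIdx, hf]
    rw [this]; omega

lemma filter_kept (i : Int) (session : List (List (String × Int))) (seen : PySem.Set Int) :
    (keptAux seen session).filter (fun ex => pvKey ex == i) =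
      (keptAux seen session).filter (fun ex => keyIdx ex == some i) := by
  apply List.filter_congr
  intro ex hx
  have hs := keptAux_isSome session seen ex hx
  rcases hf : gfindAux pvGroupDefs 0 (pvLookup ex) with _ | ⟨j, name⟩
  · rw [hf] at hs; simp at hs
  · have h1 : keyIdx ex = some j := by simp [keyIdx, hf]
    have h2 : pvKey ex = j := by simp [pvKey, h1]
    simp [h1, h2]

lemma pvBlocks_seven {α : Type} (k : α → Int) (xs : List α) :
    pvBlocks k xs 7 0 =
      xs.filter (fun x => k x == 0) ++ (xs.filter (fun x => k x == 1) ++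
      (xs.filter (fun x => k x == 2) ++ (xs.filter (fun x => k x == 3) ++
      (xs.filter (fun x => k x == 4) ++ (xs.filter (fun x => k x == 5) ++
      (xs.filter (fun x => k x == 6) ++ [])))))) := by
  show pvBlocks k xs (6+1) 0 = _
  rw [pvBlocks]
  show _ ++ pvBlocks k xs (5+1) 1 = _
  rw [pvBlocks]
  show _ ++ (_ ++ pvBlocks k xs (4+1) 2) = _
  rw [pvBlocks]
  show _ ++ (_ ++ (_ ++ pvBlocks k xs (3+1) 3)) = _
  rw [pvBlocks]
  show _ ++ (_ ++ (_ ++ (_ ++ pvBlocks k xs (2+1) 4))) = _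
  rw [pvBlocks]
  show _ ++ (_ ++ (_ ++ (_ ++ (_ ++ pvBlocks k xs (1+1) 5)))) = _
  rw [pvBlocks]
  show _ ++ (_ ++ (_ ++ (_ ++ (_ ++ (_ ++ pvBlocks k xs (0+1) 6))))) = _
  rw [pvBlocks]
  norm_num [pvBlocks]

lemma pvGrouped0_getD (nm : String) : pvGrouped0.getD nm [] = [] := by
  simp only [pvGrouped0, PySem.Dict.getD_eq_get?_getD, PySem.Dict.get?_mk_cons]
  split_ifs <;> rfl

lemma main_eq (session : List (List (String × Int))) :
    reorder_exercises2 session = reorder_exercises2_alt session := by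
  have hA : reorder_exercises2 session =
      (session.foldl pvStep (pvGrouped0, PySem.Set.empty)).1.keys.foldl
        (fun acc name =>
          acc ++ (session.foldl pvStep (pvGrouped0, PySem.Set.empty)).1.getD name []) [] := rfl
  have hB : reorder_exercises2_alt session =
      PySem.List.sorted
        ((session.foldl
          (fun ks ex =>
            let eid := pvLookup ex
            if pvRank.contains eid ∧ eid ∉ ks.2 then (ks.1 ++ [ex], PySem.Set.add ks.2 eid)
            else ks)
          ([], PySem.Set.empty)).1)
        (fun ex => pvRank.getD (pvLookup ex) 0) := rfl
  rw [hA, hB, bfold session [] PySem.Set.empty, List.nil_append]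
  have hkf : (fun ex => pvRank.getD (pvLookup ex) 0) = pvKey := by
    funext ex
    rw [PySem.Dict.getD_eq_get?_getD, rank_get]
    rfl
  rw [hkf]
  rw [sorted_eq_pvBlocks pvKey 7 _
    (fun y hy => by
      have := pvKey_bounds session PySem.Set.empty y hy
      exact ⟨this.1, by exact_mod_cast this.2⟩)]
  rw [pvBlocks_seven]
  rw [filter_kept 0, filter_kept 1, filter_kept 2, filter_kept 3, filter_kept 4,
    filter_kept 5, filter_kept 6]
  have hk0 : pvGrouped0.keys = pvNames := by decide
  have hkeys : (session.foldl pvStep (pvGrouped0, PySem.Set.empty)).1.keys = pvNames :=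
    fold_keys session _ hk0
  rw [hkeys]
  have h0 := fold_getD session pvGrouped0 PySem.Set.empty hk0 0 (by norm_num)
  have h1 := fold_getD session pvGrouped0 PySem.Set.empty hk0 1 (by norm_num)
  have h2 := fold_getD session pvGrouped0 PySem.Set.empty hk0 2 (by norm_num)
  have h3 := fold_getD session pvGrouped0 PySem.Set.empty hk0 3 (by norm_num)
  have h4 := fold_getD session pvGrouped0 PySem.Set.empty hk0 4 (by norm_num)
  have h5 := fold_getD session pvGrouped0 PySem.Set.empty hk0 5 (by norm_num)
  have h6 := fold_getD session pvGrouped0 PySem.Set.empty hk0 6 (by norm_num)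
  simp only [pvNames, List.getD, List.getElem?_cons_zero, List.getElem?_cons_succ,
    Option.getD_some, Nat.cast_zero, Nat.cast_one, Nat.cast_ofNat, pvGrouped0_getD,
    List.nil_append] at h0 h1 h2 h3 h4 h5 h6
  simp only [pvNames, List.foldl_cons, List.foldl_nil, List.nil_append]
  rw [h0, h1, h2, h3, h4, h5, h6]
  simp [List.append_assoc]

-- ===== VERDICT (by name: the statement is the Claim_ definition above) =====
theorem reorder_exercises2_spec : Claim_equal_reorder_exercises2 := by
  intro session _ _
  unfold Spec_reorder_exercises2
  exact main_eq session
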